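-- pv_equiv track=rewrite | github.com/Capstone-Projects-2025-Fall/project-002-aac-api | Initial_API/speechRecognition.py | classify_command
-- ===== SOURCE A (Python) =====
-- from typing import Optional, Dict, List, Any, Tuple
--
-- COMMAND_CATEGORIES = {
--     "navigation": ["back", "next", "previous", "home", "menu", "exit", "up", "down", "left", "right"],
--     "selection": ["select", "choose", "pick", "open", "close", "cancel", "confirm", "delete", "yes", "no"],
--     "communication": ["hello", "goodbye", "thank you", "please", "sorry", "wait", "more", "done", "help"],
--     "media": ["play", "pause", "stop", "repeat", "louder", "quieter"]
-- }
--
-- def classify_command(text: str) -> Optional[str]: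
--     """Classify recognized text into AAC command category."""
--     if not text:
--         return None
--
--     text_lower = text.lower().strip()
--     words = text_lower.split()
--
--     for category, commands in COMMAND_CATEGORIES.items():
--         for word in words:
--             if word in commands:
--                 return category
--
--     return "freeform"
-- ===== SOURCE B (Python) =====
-- from typing import Optional
--
-- COMMAND_CATEGORIES = {
--     "navigation": ["back", "next", "previous", "home", "menu", "exit", "up", "down", "left", "right"],
--     "selection": ["select", "choose", "pick", "open", "close", "cancel", "confirm", "delete", "yes", "no"],
--     "communication": ["hello", "goodbye", "thank you", "please", "sorry", "wait", "more", "done", "help"],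
--     "media": ["play", "pause", "stop", "repeat", "louder", "quieter"]
-- }
--
-- # Word -> (category priority index, category name), first category wins.
-- _WORD_RANK = {}
-- for _i, (_cat, _cmds) in enumerate(COMMAND_CATEGORIES.items()):
--     for _w in _cmds:
--         _WORD_RANK.setdefault(_w, (_i, _cat))
--
--
-- def classify_command(text: str) -> Optional[str]:
--     """Classify recognized text into AAC command category."""
--     if not text:
--         return None
--     matched = [_WORD_RANK[w] for w in text.lower().strip().split() if w in _WORD_RANK]
--     if not matched:
--         return "freeform"
--     return min(matched)[1]
-- ===== Notes on version B (the rewrite author's own statement) =====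
-- stated objective: alternative
-- what changed: Replaces the nested category-by-word early-return scan with a precomputed word->(priority,category) dict built once from COMMAND_CATEGORIES; classify_command then filters the words through one dict lookup pass and returns the category of the minimum-priority match (or 'freeform' / None as before).
import Mathlib
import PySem

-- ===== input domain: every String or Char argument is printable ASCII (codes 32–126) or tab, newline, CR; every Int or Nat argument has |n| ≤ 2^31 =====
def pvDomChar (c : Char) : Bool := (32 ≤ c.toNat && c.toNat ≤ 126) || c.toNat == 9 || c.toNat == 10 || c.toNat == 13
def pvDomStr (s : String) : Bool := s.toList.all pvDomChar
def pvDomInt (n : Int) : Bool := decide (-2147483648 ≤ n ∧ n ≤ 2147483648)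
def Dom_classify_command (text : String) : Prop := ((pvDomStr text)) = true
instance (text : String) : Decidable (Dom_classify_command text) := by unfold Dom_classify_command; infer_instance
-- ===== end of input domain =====

-- B replaces A's nested category-by-word scan with a precomputed word->(priority, category)
-- dictionary and a single min-reducing pass over the words (objective: alternative).


-- shared module constant COMMAND_CATEGORIES (dict -> association list, insertion order)
def COMMAND_CATEGORIES : List (String × List String) :=
  [("navigation", ["back", "next", "previous", "home", "menu", "exit", "up", "down", "left", "right"]),
   ("selection", ["select", "choose", "pick", "open", "close", "cancel", "confirm", "delete", "yes", "no"]),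
   ("communication", ["hello", "goodbye", "thank you", "please", "sorry", "wait", "more", "done", "help"]),
   ("media", ["play", "pause", "stop", "repeat", "louder", "quieter"])]

-- ===== PORT A =====
-- the nested 'for category, commands … for word in words … return category' loop
def classify_command_loop (cats : List (String × List String)) (words : List String) : Option String :=
  match cats with
  | [] => none
  | (cat, cmds) :: rest =>
    if words.any (fun w => cmds.contains w) then some cat
    else classify_command_loop rest words

def classify_command (text : String) : Option String :=
  if text = "" then none
  else
    let words := PySem.Str.split₀ (PySem.Str.strip (PySem.Str.lower text))
    match classify_command_loop COMMAND_CATEGORIES words with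
    | some cat => some cat
    | none => some "freeform"

-- ===== PORT B =====
-- module-level table: for _i, (_cat, _cmds) in enumerate(...): for _w in _cmds: _WORD_RANK.setdefault(_w, (_i, _cat))
def WORD_RANK : PySem.Dict String (Int × String) :=
  (PySem.List.enumerate COMMAND_CATEGORIES 0).foldl
    (fun d e => e.2.2.foldl (fun d' w => d'.setdefault w (e.1, e.2.1)) d)
    PySem.Dict.empty

def classify_command_alt (text : String) : Option String :=
  if text = "" then none
  else
    let words := PySem.Str.split₀ (PySem.Str.strip (PySem.Str.lower text))
    let matched := words.filterMap (fun w => WORD_RANK.get? w)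
    match PySem.List.min2? matched (fun p => p.1) (fun p => p.2) with
    | none => some "freeform"
    | some p => some p.2

-- ===== PRECONDITION & SPEC =====
def Spec_classify_command (text : String) (out : Option String) : Prop := out = classify_command_alt text
instance (text : String) (out : Option String) : Decidable (Spec_classify_command text out) := by unfold Spec_classify_command; infer_instance

-- ===== CLAIM (what is proved, stated in full; the proofs are below) =====
def Claim_equal_classify_command : Prop := ∀ (text : String), Dom_classify_command text → Spec_classify_command text (classify_command text)

-- ===== LEMMAS AND PROOFS =====

-- the first-category priority of a word, as A's data sees it
def rankSpec (cats : List (String × List String)) (i : Int) (w : String) : Option (Int × String) :=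
  match cats with
  | [] => none
  | (cat, cmds) :: rest => if cmds.contains w then some (i, cat) else rankSpec rest (i + 1) w

lemma fold_setdefault_get? (cmds : List String) (d : PySem.Dict String (Int × String))
    (v : Int × String) (w : String) :
    (cmds.foldl (fun d' x => d'.setdefault x v) d).get? w =
      match d.get? w with
      | some u => some u
      | none => if cmds.contains w then some v else none := by
  induction cmds generalizing d with
  | nil => cases h : d.get? w <;> simp [h]
  | cons x rest ih =>
    simp only [List.foldl_cons, ih]
    by_cases hxw : w = x
    · subst hxw
      rw [PySem.Dict.get?_setdefault_self]
      cases h : d.get? w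
      · simp
      · simp
    · rw [PySem.Dict.get?_setdefault_of_ne d v hxw]
      cases h : d.get? w
      · simp [hxw]
      · simp

lemma build_get? (cats : List (String × List String)) (i : Int)
    (d : PySem.Dict String (Int × String)) (w : String) :
    ((PySem.List.enumerate cats i).foldl
        (fun d e => e.2.2.foldl (fun d' x => d'.setdefault x (e.1, e.2.1)) d) d).get? w =
      match d.get? w with
      | some u => some u
      | none => rankSpec cats i w := by
  induction cats generalizing i d with
  | nil =>
    rw [PySem.List.enumerate_nil, List.foldl_nil]
    cases h : d.get? w
    · simp [rankSpec]
    · simp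
  | cons c rest ih =>
    obtain ⟨cat, cmds⟩ := c
    rw [PySem.List.enumerate_cons, List.foldl_cons, ih, fold_setdefault_get?]
    cases h : d.get? w with
    | some u => simp
    | none => by_cases hm : w ∈ cmds <;> simp [rankSpec, hm]

lemma WORD_RANK_get? (w : String) : WORD_RANK.get? w = rankSpec COMMAND_CATEGORIES 0 w := by
  rw [WORD_RANK, build_get?]
  simp [PySem.Dict.get?_empty]

lemma rankSpec_fst_le (cats : List (String × List String)) (i : Int) (w : String)
    (p : Int × String) (h : rankSpec cats i w = some p) : i ≤ p.1 := by
  induction cats generalizing i with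
  | nil => simp [rankSpec] at h
  | cons c rest ih =>
    obtain ⟨cat, cmds⟩ := c
    simp only [rankSpec] at h
    split at h
    · cases h; simp
    · have := ih (i + 1) h; omega

-- a running-min style fold returns p once every element is p or strictly larger in key
lemma foldl_min_eq {α : Type} (f : Option α → α → Option α) (p : α) (key : α → Int)
    (hf_none : ∀ x, f none x = some x)
    (hf_some : ∀ m x, f (some m) x = some x ∨ f (some m) x = some m)
    (hf_p : ∀ x, (x = p ∨ key p < key x) → f (some p) x = some p)
    (hf_take : ∀ m, key p < key m → f (some m) p = some p) :
    ∀ (L : List α) (acc : Option α),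
      (∀ x ∈ L, x = p ∨ key p < key x) →
      (match acc with
       | none => p ∈ L
       | some q => q = p ∨ (key p < key q ∧ p ∈ L)) →
      L.foldl f acc = some p := by
  intro L
  induction L with
  | nil =>
    intro acc _ hacc
    match acc, hacc with
    | some q, hq =>
      rcases hq with h | ⟨_, h⟩
      · simp [h]
      · simp at h
  | cons x rest ih =>
    intro acc hall hacc
    have hx := hall x (by simp)
    have hall' : ∀ y ∈ rest, y = p ∨ key p < key y := fun y hy => hall y (by simp [hy])
    rw [List.foldl_cons]
    match acc, hacc with
    | none, hmem =>
      refine ih (f none x) hall' ?_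
      rw [hf_none]
      rcases hx with hxp | hlt
      · exact Or.inl hxp
      · have hne : x ≠ p := fun h => by subst h; exact lt_irrefl _ hlt
        have hp' : p ∈ rest := by
          rcases List.mem_cons.mp hmem with h | h
          · exact absurd h.symm hne
          · exact h
        exact Or.inr ⟨hlt, hp'⟩
    | some q, hq =>
      rcases hq with hqp | ⟨hqlt, hmem⟩
      · subst hqp
        refine ih _ hall' ?_
        rw [hf_p x hx]
        exact Or.inl rfl
      · rcases hx with hxp | hlt
        · subst hxp
          refine ih _ hall' ?_
          rw [hf_take q hqlt]
          exact Or.inl rfl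
        · have hne : x ≠ p := fun h => by subst h; exact lt_irrefl _ hlt
          have hp' : p ∈ rest := by
            rcases List.mem_cons.mp hmem with h | h
            · exact absurd h.symm hne
            · exact h
          refine ih _ hall' ?_
          rcases hf_some q x with h | h <;> rw [h]
          · exact Or.inr ⟨hlt, hp'⟩
          · exact Or.inr ⟨hqlt, hp'⟩

lemma min2?_eq_of_min (L : List (Int × String)) (p : Int × String)
    (hall : ∀ x ∈ L, x = p ∨ p.1 < x.1) (hmem : p ∈ L) :
    PySem.List.min2? L (fun p => p.1) (fun p => p.2) = some p := by
  unfold PySem.List.min2?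
  refine foldl_min_eq _ p (fun a => a.1) ?_ ?_ ?_ ?_ L none hall hmem
  · intro x; rfl
  · intro m x
    by_cases hc : (decide (x.1 < m.1) || !decide (m.1 < x.1) && decide (x.2 < m.2)) = true
    · left; simp only [hc, if_pos]
    · right; simp only [if_neg hc]
  · intro x hx
    have hc : (decide (x.1 < p.1) || !decide (p.1 < x.1) && decide (x.2 < p.2)) = false := by
      rcases hx with hxp | hlt
      · subst hxp; simp
      · have hlt' : p.1 < x.1 := hlt
        have h1 : ¬ x.1 < p.1 := by omega
        simp [h1, hlt']
    simp only [hc]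
    rfl
  · intro m hm
    have hc : (decide (p.1 < m.1) || !decide (m.1 < p.1) && decide (p.2 < m.2)) = true := by
      simp [hm]
    simp only [hc, if_pos]

lemma main_lemma (cats : List (String × List String)) (i : Int) (words : List String) :
    (match PySem.List.min2? (words.filterMap (rankSpec cats i)) (fun p => p.1) (fun p => p.2) with
     | none => none
     | some p => some p.2) = classify_command_loop cats words := by
  induction cats generalizing i with
  | nil =>
    simp [rankSpec, classify_command_loop, PySem.List.min2?]
  | cons c rest ih =>
    obtain ⟨cat, cmds⟩ := c
    by_cases h : words.any (fun w => cmds.contains w)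
    · -- some word matches this category: both sides give cat
      simp only [classify_command_loop, if_pos h]
      obtain ⟨w0, hw0, hw0c⟩ := List.any_eq_true.mp h
      have hw0m : w0 ∈ cmds := by simpa using hw0c
      have hmem : (i, cat) ∈ words.filterMap (rankSpec ((cat, cmds) :: rest) i) :=
        List.mem_filterMap.mpr ⟨w0, hw0, by simp [rankSpec, hw0m]⟩
      have hall : ∀ x ∈ words.filterMap (rankSpec ((cat, cmds) :: rest) i),
          x = (i, cat) ∨ i < x.1 := by
        intro x hx
        obtain ⟨w, _, hwx⟩ := List.mem_filterMap.mp hx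
        simp only [rankSpec] at hwx
        split at hwx
        · left; cases hwx; rfl
        · right; have := rankSpec_fst_le rest (i + 1) w x hwx; omega
      rw [min2?_eq_of_min _ _ hall hmem]
    · -- no word matches this category: rankSpec falls through to rest
      simp only [classify_command_loop, if_neg h]
      have hnone : ∀ w ∈ words, w ∉ cmds := by
        intro w hw hc
        exact h (List.any_eq_true.mpr ⟨w, hw, by simpa using hc⟩)
      have hcongr : words.filterMap (rankSpec ((cat, cmds) :: rest) i)
          = words.filterMap (rankSpec rest (i + 1)) := by
        apply List.filterMap_congr
        intro w hw
        simp only [rankSpec]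
        rw [if_neg (by simpa using hnone w hw)]
      rw [hcongr, ih (i + 1)]

-- ===== VERDICT (by name: the statement is the Claim_ definition above) =====
theorem classify_command_spec : Claim_equal_classify_command := by
  intro text _hdom
  unfold Spec_classify_command classify_command classify_command_alt
  by_cases h : text = ""
  · simp [h]
  · simp only [if_neg h]
    have hget : (fun w => WORD_RANK.get? w) = fun w => rankSpec COMMAND_CATEGORIES 0 w :=
      funext WORD_RANK_get?
    rw [hget]
    have hm := main_lemma COMMAND_CATEGORIES 0
      (PySem.Str.split₀ (PySem.Str.strip (PySem.Str.lower text)))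
    cases hc : PySem.List.min2?
        ((PySem.Str.split₀ (PySem.Str.strip (PySem.Str.lower text))).filterMap
          (rankSpec COMMAND_CATEGORIES 0)) (fun p => p.1) (fun p => p.2) with
    | none => rw [hc] at hm; rw [← hm]
    | some p => rw [hc] at hm; rw [← hm]
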